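-- pv_equiv track=rewrite | github.com/PdxCodeGuild/class_sturgeon | code/liz/python_labs/lab_10.py | lst_of_dicts_to_csv
-- ===== SOURCE A (Python) =====
-- def lst_of_dicts_to_csv (contacts):
--     headers = [key for key in contacts[0]]
--     contact_str = ','.join(headers) + '\n'
--     counter = 0
--     for contact in contacts:
--         counter += 1
--         if len(contacts) == counter:
--             contact_str += f'{contact[headers[0]]},{contact[headers[1]]},{contact[headers[2]]}'
--         else:
--             contact_str += f'{contact[headers[0]]},{contact[headers[1]]},{contact[headers[2]]}\n'
--
--     return contact_str
-- ===== SOURCE B (Python) =====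
-- def lst_of_dicts_to_csv(contacts):
--     headers = list(contacts[0])
--     rows = [f'{c[headers[0]]},{c[headers[1]]},{c[headers[2]]}' for c in contacts]
--     return ','.join(headers) + '\n' + '\n'.join(rows)
-- ===== Notes on version B (the rewrite author's own statement) =====
-- stated objective: simpler
-- what changed: B replaces A's manual counter with a last-element branch and string accumulation by building the list of row strings with a comprehension and joining header and rows with '\n'.join, so the no-trailing-newline behaviour falls out of the join.
import Mathlib
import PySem

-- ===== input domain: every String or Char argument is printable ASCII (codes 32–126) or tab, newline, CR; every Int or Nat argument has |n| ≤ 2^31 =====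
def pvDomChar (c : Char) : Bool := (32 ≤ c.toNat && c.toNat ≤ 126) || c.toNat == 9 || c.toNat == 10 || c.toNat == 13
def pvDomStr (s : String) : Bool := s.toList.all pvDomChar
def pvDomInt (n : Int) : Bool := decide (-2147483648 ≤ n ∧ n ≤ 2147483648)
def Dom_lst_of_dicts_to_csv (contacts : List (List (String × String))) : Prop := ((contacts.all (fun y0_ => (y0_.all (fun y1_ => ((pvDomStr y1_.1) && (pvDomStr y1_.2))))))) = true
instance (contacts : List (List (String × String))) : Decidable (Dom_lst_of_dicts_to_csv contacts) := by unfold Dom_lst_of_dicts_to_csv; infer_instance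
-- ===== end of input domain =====

-- B replaces A's counter + last-element branch with a row comprehension joined by '\n'; return value only.

-- shared helper: the data row 'c[h0],c[h1],c[h2]' both Pythons compute identically (dict lookup; KeyError excluded by Pre_)
def pvRow (headers : List String) (c : List (String × String)) : List Char :=
  ((PySem.Dict.ofList c).getD (headers.getD 0 "") "").toList ++ ',' ::
  ((PySem.Dict.ofList c).getD (headers.getD 1 "") "").toList ++ ',' ::
  ((PySem.Dict.ofList c).getD (headers.getD 2 "") "").toList

-- ===== PORT A =====
def lst_of_dicts_to_csv (contacts : List (List (String × String))) : String :=
  let headers := (PySem.Dict.ofList (contacts.headD [])).keys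
  let init : Int × List Char := (0, PySem.Chars.join [','] (headers.map String.toList) ++ ['\n'])
  let res := contacts.foldl (fun st contact =>
    let counter := st.1 + 1
    if (contacts.length : Int) = counter then (counter, st.2 ++ pvRow headers contact)
    else (counter, st.2 ++ pvRow headers contact ++ ['\n'])) init
  String.mk res.2

-- ===== PORT B =====
def lst_of_dicts_to_csv_alt (contacts : List (List (String × String))) : String :=
  let headers := (PySem.Dict.ofList (contacts.headD [])).keys
  let rows := contacts.map (pvRow headers)
  String.mk (PySem.Chars.join [','] (headers.map String.toList) ++ '\n' :: PySem.Chars.join ['\n'] rows)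

-- ===== PRECONDITION & SPEC =====
-- Pre_ excludes exactly the inputs where the Python A raises: empty contacts (IndexError on contacts[0]),
-- fewer than 3 keys in contacts[0] (IndexError on headers[2]), or a contact missing one of the first
-- three header keys (KeyError). B raises on the same inputs.
def Pre_lst_of_dicts_to_csv (contacts : List (List (String × String))) : Prop :=
  contacts ≠ [] ∧
  3 ≤ ((PySem.Dict.ofList (contacts.headD [])).keys).length ∧
  ∀ c ∈ contacts,
    (PySem.Dict.ofList c).contains (((PySem.Dict.ofList (contacts.headD [])).keys).getD 0 "") = true ∧
    (PySem.Dict.ofList c).contains (((PySem.Dict.ofList (contacts.headD [])).keys).getD 1 "") = true ∧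
    (PySem.Dict.ofList c).contains (((PySem.Dict.ofList (contacts.headD [])).keys).getD 2 "") = true
instance (contacts : List (List (String × String))) : Decidable (Pre_lst_of_dicts_to_csv contacts) := by
  unfold Pre_lst_of_dicts_to_csv; infer_instance
def pvWitness_lst_of_dicts_to_csv : (List (List (String × String))) :=
  [[("name", "liz"), ("phone", "555"), ("city", "pdx")]]

def Spec_lst_of_dicts_to_csv (contacts : List (List (String × String))) (out : String) : Prop := out = lst_of_dicts_to_csv_alt contacts
instance (contacts : List (List (String × String))) (out : String) : Decidable (Spec_lst_of_dicts_to_csv contacts out) := by unfold Spec_lst_of_dicts_to_csv; infer_instance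

-- ===== CLAIM (what is proved, stated in full; the proofs are below) =====
def Claim_equal_lst_of_dicts_to_csv : Prop := ∀ (contacts : List (List (String × String))), Dom_lst_of_dicts_to_csv contacts → Pre_lst_of_dicts_to_csv contacts → Spec_lst_of_dicts_to_csv contacts (lst_of_dicts_to_csv contacts)

-- ===== LEMMAS AND PROOFS =====

-- A's counter loop, for ANY row function and ANY start: appending each row and a '\n' except at
-- position 'total' is appending the '\n'-join of the rows (total = counter after the last element).
theorem pvLoop_eq {α : Type} (row : α → List Char) (total : Int) :
    ∀ (xs : List α) (c : Int) (acc : List Char), total = c + xs.length →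
    (xs.foldl (fun st x =>
        if total = st.1 + 1 then (st.1 + 1, st.2 ++ row x)
        else (st.1 + 1, st.2 ++ row x ++ ['\n'])) (c, acc)).2
      = acc ++ PySem.Chars.join ['\n'] (xs.map row) := by
  intro xs
  induction xs with
  | nil => intro c acc h; simp [PySem.Chars.join_nil]
  | cons x rest ih =>
    intro c acc h
    cases rest with
    | nil =>
      have ht : total = c + 1 := by simpa using h
      simp [List.foldl_cons, ht, PySem.Chars.join_singleton]
    | cons y ys =>
      have hne : ¬ total = c + 1 := by
        simp only [List.length_cons] at h
        push_cast at h
        omega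
      rw [List.foldl_cons]
      simp only []
      rw [if_neg hne]
      rw [ih (c + 1) (acc ++ row x ++ ['\n']) (by simp only [List.length_cons] at h ⊢; push_cast at h ⊢; omega)]
      simp [PySem.Chars.join_cons_cons, List.append_assoc]

-- ===== VERDICT (by name: the statement is the Claim_ definition above) =====
theorem lst_of_dicts_to_csv_spec : Claim_equal_lst_of_dicts_to_csv := by
  intro contacts _ _
  unfold Spec_lst_of_dicts_to_csv
  simp only [lst_of_dicts_to_csv, lst_of_dicts_to_csv_alt]
  apply congrArg String.mk
  rw [pvLoop_eq (pvRow ((PySem.Dict.ofList (contacts.headD [])).keys)) (contacts.length : Int)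
        contacts 0 _ (by simp)]
  simp
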